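-- pv_equiv track=rewrite | github.com/kbeach25/GoFish | app.py | check_and_remove_sets
-- ===== SOURCE A (Python) =====
-- def convertRank(rank, translation):
--
--     # From 0-13 scale to suit scale
--     if translation == "to_suit":
--         suit_rank = int(rank) + 2
--
--         if suit_rank == 11:
--             return "JACK"
--         elif suit_rank == 12:
--             return "QUEEN"
--         elif suit_rank == 13:
--             return "KING"
--         elif suit_rank == 14:
--             return "ACE"
--         else:
--             return str(suit_rank)
--
--     # From suit scale to 0-13 scale, the way the environment understands it
--     elif translation == "to_env":
--         if rank == "JACK":
--             return 9
--         elif rank == "QUEEN":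
--             return 10
--         elif rank == "KING":
--             return 11
--         elif rank == "ACE":
--             return 12
--         else:
--             return int(rank) - 2
--
-- def check_and_remove_sets(hand, env_hand, player_name):
--     sets_completed = []
--
--     # Count cards by rank
--     rank_counts = {}
--     for card in hand:
--         rank = convertRank(card['value'], 'to_env')
--         if rank not in rank_counts:
--             rank_counts[rank] = []
--         rank_counts[rank].append(card)
--
--     # Find complete sets (4 cards)
--     updated_hand = hand.copy()
--     updated_env_hand = env_hand.copy()
--
--     for rank, cards in rank_counts.items():
--         if len(cards) == 4:
--             # Remove all 4 cards from visual hand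
--             for card in cards:
--                 if card in updated_hand:
--                     updated_hand.remove(card)
--
--             # Remove all 4 cards from environment hand
--             for _ in range(4):
--                 if rank in updated_env_hand:
--                     updated_env_hand.remove(rank)
--
--             # Record the completed set
--             display_rank = convertRank(rank, "to_suit")
--             sets_completed.append(display_rank)
--
--     return updated_hand, updated_env_hand, sets_completed
-- ===== SOURCE B (Python) =====
-- def convertRank(rank, translation):
--     if translation == "to_suit":
--         suit_rank = int(rank) + 2
--         if suit_rank == 11:
--             return "JACK"
--         elif suit_rank == 12:
--             return "QUEEN"
--         elif suit_rank == 13: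
--             return "KING"
--         elif suit_rank == 14:
--             return "ACE"
--         else:
--             return str(suit_rank)
--     elif translation == "to_env":
--         if rank == "JACK":
--             return 9
--         elif rank == "QUEEN":
--             return 10
--         elif rank == "KING":
--             return 11
--         elif rank == "ACE":
--             return 12
--         else:
--             return int(rank) - 2
--
-- def check_and_remove_sets(hand, env_hand, player_name):
--     ranks = [convertRank(c['value'], 'to_env') for c in hand]
--     counts = {}
--     for r in ranks:
--         counts[r] = counts.get(r, 0) + 1
--     completed = [r for r, n in counts.items() if n == 4]
--     updated_hand = [c for c, r in zip(hand, ranks) if r not in completed]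
--     cap = {r: 4 for r in completed}
--     updated_env_hand = []
--     for x in env_hand:
--         if cap.get(x, 0) > 0:
--             cap[x] -= 1
--         else:
--             updated_env_hand.append(x)
--     return updated_hand, updated_env_hand, [convertRank(r, 'to_suit') for r in completed]
-- ===== Notes on version B (the rewrite author's own statement) =====
-- stated objective: simpler
-- what changed: B replaces A's dict-of-card-lists plus per-set remove() loops (membership test + remove inside each completed set) by a rank count, a completed-ranks list in first-appearance order, one order-preserving filter pass over the hand, and one single capped pass over env_hand that drops at most 4 occurrences per completed rank.
-- outside the precondition, e.g. on check_and_remove_sets([{'suit': 'H'}], [], 'p'): A raises KeyError, B raises KeyError; on check_and_remove_sets([{'value': 'x'}], [], 'p'): A raises ValueError, B raises ValueError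
import Mathlib
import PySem

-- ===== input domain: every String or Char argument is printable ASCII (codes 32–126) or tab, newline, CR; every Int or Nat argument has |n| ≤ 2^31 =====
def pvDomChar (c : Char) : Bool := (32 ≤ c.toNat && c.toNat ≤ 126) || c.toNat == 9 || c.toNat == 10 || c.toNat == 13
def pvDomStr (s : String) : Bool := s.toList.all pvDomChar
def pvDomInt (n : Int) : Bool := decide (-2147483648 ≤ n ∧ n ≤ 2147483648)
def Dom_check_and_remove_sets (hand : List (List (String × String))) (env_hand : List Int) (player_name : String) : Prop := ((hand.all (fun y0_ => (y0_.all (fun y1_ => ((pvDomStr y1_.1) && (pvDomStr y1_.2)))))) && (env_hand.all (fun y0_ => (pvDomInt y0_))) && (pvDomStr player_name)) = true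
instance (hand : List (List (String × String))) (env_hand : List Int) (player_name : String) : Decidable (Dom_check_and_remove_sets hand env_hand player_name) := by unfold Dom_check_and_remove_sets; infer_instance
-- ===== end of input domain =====

-- B replaces A's group-remove loops by a count of ranks, one filtering pass over the hand and one
-- capped single pass over env_hand (objective: simpler one-pass decomposition, not claimed faster).

-- ===== PORT A =====
-- convertRank(rank, "to_env"): Option, none exactly where Python's int(rank) raises ValueError
def pvToEnv (rank : String) : Option Int :=
  if rank == "JACK" then some 9
  else if rank == "QUEEN" then some 10
  else if rank == "KING" then some 11
  else if rank == "ACE" then some 12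
  else (PySem.Int.ofStr? rank).map (fun n => n - 2)

-- convertRank(rank, "to_suit") on an int rank (int(rank) = rank there)
def pvToSuit (rank : Int) : String :=
  if (rank + 2) == 11 then "JACK"
  else if (rank + 2) == 12 then "QUEEN"
  else if (rank + 2) == 13 then "KING"
  else if (rank + 2) == 14 then "ACE"
  else PySem.Int.toStr (rank + 2)

-- convertRank(card['value'], 'to_env'); the getD defaults are never reached under Pre_
def pvRank (card : List (String × String)) : Int :=
  (pvToEnv (((PySem.Dict.mk card).get? "value").getD "")).getD 0

def check_and_remove_sets (hand : List (List (String × String))) (env_hand : List Int) (player_name : String) : (List (List (String × String))) × List Int × List String :=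
  -- counting loop: Python's `if rank not in rank_counts: rank_counts[rank] = []` followed by
  -- `rank_counts[rank].append(card)` is rank_counts[rank] = rank_counts.get(rank, []) + [card], i.e. Dict.modify
  ((hand.foldl (fun d card => d.modify (pvRank card) [] (fun cs => cs ++ [card]))
      PySem.Dict.empty).items).foldl
    (fun st p =>
      if p.2.length == 4 then
        (p.2.foldl (fun uh card => if uh.contains card then uh.erase card else uh) st.1,
         (PySem.List.pyRange 0 4 1).foldl
           (fun ue _ => if ue.contains p.1 then ue.erase p.1 else ue) st.2.1,
         st.2.2 ++ [pvToSuit p.1])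
      else st)
    (hand, env_hand, [])

-- ===== PORT B =====
-- ranks = hand mapped through convertRank(·,'to_env'); counts = dict count per rank;
-- completed = ranks counted exactly 4, in first-appearance order; then one filtering pass over
-- hand, one capped pass over env_hand, and the suit names of the completed ranks
def pvCompleted (hand : List (List (String × String))) : List Int :=
  ((((hand.map pvRank).foldl (fun d r => d.insert r (d.getD r 0 + 1))
      PySem.Dict.empty).items.filter (fun p => p.2 == (4 : Int))).map (fun p => p.1))

def check_and_remove_sets_alt (hand : List (List (String × String))) (env_hand : List Int) (player_name : String) : (List (List (String × String))) × List Int × List String :=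
  (((hand.zip (hand.map pvRank)).filter
      (fun p => !((pvCompleted hand).contains p.2))).map (fun p => p.1),
   (env_hand.foldl
      (fun st x => if 0 < st.1.getD x 0 then (st.1.modify x 0 (fun v => v - 1), st.2)
                   else (st.1, st.2 ++ [x]))
      ((pvCompleted hand).foldl (fun d r => d.insert r (4 : Int)) PySem.Dict.empty,
       ([] : List Int))).2,
   (pvCompleted hand).map pvToSuit)

-- ===== PRECONDITION & SPEC =====
-- card['value'] exists and convertRank(·,'to_env') does not raise
def pvCardOk (c : List (String × String)) : Bool :=
  match (PySem.Dict.mk c).get? "value" with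
  | none => false
  | some v => v == "JACK" || v == "QUEEN" || v == "KING" || v == "ACE" || (PySem.Int.ofStr? v).isSome

-- exactly the inputs on which Python A returns: every card has a 'value' key naming a face card or
-- an int-parsable string (otherwise A raises KeyError / ValueError)
def Pre_check_and_remove_sets (hand : List (List (String × String))) (env_hand : List Int) (player_name : String) : Prop :=
  hand.all pvCardOk = true
instance (hand : List (List (String × String))) (env_hand : List Int) (player_name : String) : Decidable (Pre_check_and_remove_sets hand env_hand player_name) := by unfold Pre_check_and_remove_sets; infer_instance

def pvWitness_check_and_remove_sets : (List (List (String × String))) × List Int × String :=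
  ([[("value", "ACE"), ("suit", "HEARTS")], [("value", "7"), ("suit", "SPADES")]], [12, 5], "kyle")

def Spec_check_and_remove_sets (hand : List (List (String × String))) (env_hand : List Int) (player_name : String) (out : (List (List (String × String))) × List Int × List String) : Prop := out = check_and_remove_sets_alt hand env_hand player_name
instance (hand : List (List (String × String))) (env_hand : List Int) (player_name : String) (out : (List (List (String × String))) × List Int × List String) : Decidable (Spec_check_and_remove_sets hand env_hand player_name out) := by unfold Spec_check_and_remove_sets; infer_instance

-- ===== CLAIM (what is proved, stated in full; the proofs are below) =====
def Claim_equal_check_and_remove_sets : Prop := ∀ (hand : List (List (String × String))) (env_hand : List Int) (player_name : String), Dom_check_and_remove_sets hand env_hand player_name → Pre_check_and_remove_sets hand env_hand player_name → Spec_check_and_remove_sets hand env_hand player_name (check_and_remove_sets hand env_hand player_name)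

-- ===== LEMMAS AND PROOFS =====

-- ranks completing a set, in first-appearance order
def pvDone (hand : List (List (String × String))) (rs : List Int) : List Int :=
  rs.filter (fun r => (hand.filter (fun c => pvRank c == r)).length == 4)

-- drop, for each x, the first (f x) occurrences of x
def pvDropF (f : Int → Int) : List Int → List Int
  | [] => []
  | x :: t => if 0 < f x then pvDropF (fun y => if y = x then f x - 1 else f y) t else x :: pvDropF f t

lemma pvDropF_nonpos (f : Int → Int) (h : ∀ x, f x ≤ 0) : ∀ l, pvDropF f l = l := by
  intro l
  induction l with
  | nil => rfl
  | cons x t ih => simp [pvDropF, not_lt.mpr (h x), ih]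

lemma pvDropF_add : ∀ (l : List Int) (f g : Int → Int), (∀ x, 0 ≤ f x) → (∀ x, 0 ≤ g x) →
    pvDropF f (pvDropF g l) = pvDropF (fun x => f x + g x) l := by
  intro l
  induction l with
  | nil => intro f g _ _; rfl
  | cons x t ih =>
    intro f g hf hg
    by_cases hgx : 0 < g x
    · have hfg : 0 < f x + g x := by have := hf x; omega
      simp only [pvDropF, if_pos hgx, if_pos hfg]
      rw [ih _ _ hf (fun y => by by_cases hy : y = x <;> simp [hy] <;> [omega; exact hg y])]
      congr 1
      funext y
      by_cases hy : y = x <;> simp [hy] <;> omega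
    · have hg0 : g x = 0 := by have := hg x; omega
      simp only [pvDropF, if_neg hgx]
      by_cases hfx : 0 < f x
      · have hfg : 0 < f x + g x := by omega
        simp only [pvDropF, if_pos hfx, if_pos hfg]
        rw [ih _ _ (fun y => by by_cases hy : y = x <;> simp [hy] <;> [omega; exact hf y]) hg]
        congr 1
        funext y
        by_cases hy : y = x <;> simp [hy] <;> omega
      · have hfg : ¬ 0 < f x + g x := by omega
        simp only [pvDropF, if_neg hfx, if_neg hfg]
        rw [ih _ _ hf hg]

def pvInd (r a : Int) : Int → Int := fun y => if y = r then a else 0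

lemma pvInd_nonneg (r a : Int) (ha : 0 ≤ a) : ∀ y, 0 ≤ pvInd r a y := by
  intro y; unfold pvInd; split <;> omega

lemma pv_step_eq (r : Int) : ∀ l : List Int,
    (if l.contains r then l.erase r else l) = pvDropF (pvInd r 1) l := by
  intro l
  induction l with
  | nil => rfl
  | cons x t ih =>
    by_cases hx : x = r
    · subst hx
      have h1 : (x :: t).contains x = true := by simp
      rw [if_pos h1, List.erase_cons_head]
      have h2 : pvInd x 1 x = 1 := by simp [pvInd]
      simp only [pvDropF, h2]
      rw [if_pos (by omega : (0:Int) < 1)]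
      rw [pvDropF_nonpos _ (fun y => by by_cases hy : y = x <;> simp [hy, pvInd])]
    · have hxr : (x == r) = false := by simp [hx]
      have hrx : (r == x) = false := beq_eq_false_iff_ne.mpr (fun h => hx h.symm)
      have h1 : (x :: t).contains r = t.contains r := by
        rw [List.contains_cons, hrx, Bool.false_or]
      have h2 : (x :: t).erase r = x :: t.erase r := by simp [List.erase_cons, hxr]
      have h3 : pvInd r 1 x = 0 := by simp [pvInd, hx]
      simp only [pvDropF, h3]
      rw [if_neg (by omega : ¬ (0:Int) < 0), ← ih, h1, h2]
      by_cases ht : r ∈ t <;> simp [ht]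

lemma pvInd_comb (r a b : Int) (ha : 0 ≤ a) (hb : 0 ≤ b) (l : List Int) :
    pvDropF (pvInd r a) (pvDropF (pvInd r b) l) = pvDropF (pvInd r (a + b)) l := by
  rw [pvDropF_add l (pvInd r a) (pvInd r b) (pvInd_nonneg r a ha) (pvInd_nonneg r b hb)]
  congr 1
  funext y
  by_cases hy : y = r <;> simp [pvInd, hy]

lemma pv_env4 (r : Int) (l : List Int) :
    (PySem.List.pyRange 0 4 1).foldl (fun ue _ => if ue.contains r then ue.erase r else ue) l
      = pvDropF (pvInd r 4) l := by
  have hr : PySem.List.pyRange 0 4 1 = [0, 1, 2, 3] := by decide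
  rw [hr]
  simp only [List.foldl_cons, List.foldl_nil]
  rw [pv_step_eq r l, pv_step_eq r _, pv_step_eq r _, pv_step_eq r _]
  rw [pvInd_comb r 1 1 (by omega) (by omega), pvInd_comb r (1 + 1) 1 (by omega) (by omega),
      pvInd_comb r (1 + 1 + 1) 1 (by omega) (by omega)]
  norm_num

lemma pv_foldl_rem_cons {α : Type} [BEq α] [LawfulBEq α] (c : α) (cmds : List α)
    (h : ∀ x ∈ cmds, x ≠ c) :
    ∀ t : List α, cmds.foldl (fun uh x => if uh.contains x then uh.erase x else uh) (c :: t)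
      = c :: cmds.foldl (fun uh x => if uh.contains x then uh.erase x else uh) t := by
  induction cmds with
  | nil => intro t; rfl
  | cons a as ih =>
    intro t
    have hac : (c == a) = false := beq_eq_false_iff_ne.mpr (Ne.symm (h a (by simp)))
    have hca : (a == c) = false := beq_eq_false_iff_ne.mpr (h a (by simp))
    have h1 : (c :: t).contains a = t.contains a := by
      rw [List.contains_cons, hca, Bool.false_or]
    have h2 : (c :: t).erase a = c :: t.erase a := by simp [List.erase_cons, hac]
    simp only [List.foldl_cons]
    have hstep : (if (c :: t).contains a then (c :: t).erase a else (c :: t))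
        = c :: (if t.contains a then t.erase a else t) := by
      rw [h1, h2]
      by_cases ht : a ∈ t <;> simp [ht]
    rw [hstep, ih (fun x hx => h x (by simp [hx]))]

lemma pv_foldl_rem_filter {α : Type} [BEq α] [LawfulBEq α] (p : α → Bool) :
    ∀ l : List α, (l.filter p).foldl (fun uh x => if uh.contains x then uh.erase x else uh) l
      = l.filter (fun c => !(p c)) := by
  intro l
  induction l with
  | nil => rfl
  | cons c t ih =>
    by_cases hc : p c
    · rw [List.filter_cons_of_pos hc]
      simp only [List.foldl_cons]
      have h1 : (c :: t).contains c = true := by simp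
      rw [if_pos h1, List.erase_cons_head]
      rw [ih, List.filter_cons_of_neg (by simp [hc])]
    · rw [List.filter_cons_of_neg hc]
      rw [pv_foldl_rem_cons c (t.filter p)
        (fun x hx => by
          intro he
          subst he
          exact hc (List.of_mem_filter hx)) t]
      rw [ih, List.filter_cons_of_pos (by simp [hc])]

lemma pv_A_main (hand : List (List (String × String))) :
    ∀ rs : List Int, rs.Nodup →
    ∀ (h0 : List (List (String × String))) (e0 : List Int) (s0 : List String),
    (∀ r ∈ rs, h0.filter (fun c => pvRank c == r) = hand.filter (fun c => pvRank c == r)) →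
    (rs.map (fun r => (r, hand.filter (fun c => pvRank c == r)))).foldl
      (fun st p =>
        if p.2.length == 4 then
          (p.2.foldl (fun uh card => if uh.contains card then uh.erase card else uh) st.1,
           (PySem.List.pyRange 0 4 1).foldl
             (fun ue _ => if ue.contains p.1 then ue.erase p.1 else ue) st.2.1,
           st.2.2 ++ [pvToSuit p.1])
        else st)
      (h0, e0, s0)
    = (h0.filter (fun c => !(decide (pvRank c ∈ pvDone hand rs))),
       pvDropF (fun x => if x ∈ pvDone hand rs then 4 else 0) e0,
       s0 ++ (pvDone hand rs).map pvToSuit) := by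
  intro rs
  induction rs with
  | nil =>
    intro _ h0 e0 s0 _
    simp [pvDone, pvDropF_nonpos (fun _ => 0) (fun _ => le_refl 0) e0]
  | cons r rest ih =>
    intro hnd h0 e0 s0 hinv
    have hrni : r ∉ rest := (List.nodup_cons.mp hnd).1
    have hndr : rest.Nodup := (List.nodup_cons.mp hnd).2
    simp only [List.map_cons, List.foldl_cons]
    by_cases hc : (hand.filter (fun c => pvRank c == r)).length = 4
    · have hcb : ((hand.filter (fun c => pvRank c == r)).length == 4) = true := beq_iff_eq.mpr hc
      have hdone : pvDone hand (r :: rest) = r :: pvDone hand rest := by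
        simp [pvDone, List.filter_cons, hcb]
      simp only [hcb, if_true]
      rw [← hinv r (by simp), pv_foldl_rem_filter (fun c => pvRank c == r) h0, pv_env4 r e0]
      rw [ih hndr _ _ _ (by
        intro r' hr'
        have hne : r' ≠ r := fun he => hrni (he ▸ hr')
        rw [List.filter_filter]
        rw [List.filter_congr (fun c _ => ?_), hinv r' (by simp [hr'])]
        by_cases hcr : pvRank c = r'
        · simp [hcr, hne]
        · simp [hcr])]
      refine Prod.ext ?_ (Prod.ext ?_ ?_)
      · simp only [List.filter_filter]
        apply List.filter_congr
        intro c _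
        by_cases hcr : pvRank c = r
        · simp [hdone, hcr]
        · by_cases hm : pvRank c ∈ pvDone hand rest <;> simp [hdone, hcr, hm]
      · show pvDropF _ (pvDropF (pvInd r 4) e0) = _
        rw [pvDropF_add e0 _ (pvInd r 4)
            (fun y => by by_cases hy : y ∈ pvDone hand rest <;> simp [hy]) (pvInd_nonneg r 4 (by omega))]
        congr 1
        funext x
        by_cases hx : x = r
        · subst hx
          have hnr : x ∉ pvDone hand rest := fun hm => hrni (List.mem_of_mem_filter hm)
          simp [pvInd, hdone, hnr]
        · by_cases hm : x ∈ pvDone hand rest <;> simp [pvInd, hdone, hx, hm]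
      · show (s0 ++ [pvToSuit r]) ++ _ = _
        rw [hdone]
        simp
    · have hcb : ((hand.filter (fun c => pvRank c == r)).length == 4) = false := by
        simp [hc]
      have hdone : pvDone hand (r :: rest) = pvDone hand rest := by
        simp [pvDone, List.filter_cons, hcb]
      simp only [hcb, Bool.false_eq_true, if_false]
      rw [ih hndr _ _ _ (fun r' hr' => hinv r' (by simp [hr'])), hdone]

lemma pv_groupA (hand : List (List (String × String))) :
    (hand.foldl (fun d card => d.modify (pvRank card) [] (fun cs => cs ++ [card]))
        PySem.Dict.empty).items
      = (PySem.Set.ofList (hand.map pvRank)).map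
          (fun r => (r, hand.filter (fun c => pvRank c == r))) := by
  have hpair : ∀ (l : List (List (String × String))) (d : PySem.Dict Int (List (List (String × String)))),
      l.foldl (fun d card => d.modify (pvRank card) [] (fun cs => cs ++ [card])) d
        = (l.map (fun c => (pvRank c, c))).foldl
            (fun d p => d.modify p.1 [] (fun cs => cs ++ [p.2])) d := by
    intro l
    induction l with
    | nil => intro d; rfl
    | cons c t ih => intro d; simp only [List.foldl_cons, List.map_cons]; exact ih _
  have hnd : (hand.foldl (fun d card => d.modify (pvRank card) [] (fun cs => cs ++ [card]))
      PySem.Dict.empty).keys.Nodup := by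
    exact PySem.Dict.nodup_keys_foldl_modify_key hand pvRank [] (fun _ card cs => cs ++ [card])
      PySem.Dict.empty (by simp [PySem.Dict.keys_empty])
  have hkeys : (hand.foldl (fun d card => d.modify (pvRank card) [] (fun cs => cs ++ [card]))
      PySem.Dict.empty).keys = PySem.Set.ofList (hand.map pvRank) := by
    rw [PySem.Dict.keys_foldl_modify_key hand pvRank [] (fun _ card cs => cs ++ [card])
      PySem.Dict.empty]
    rw [PySem.Dict.keys_empty, PySem.Set.update_nil_left]
  have hget : ∀ r, (hand.foldl (fun d card => d.modify (pvRank card) [] (fun cs => cs ++ [card]))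
      PySem.Dict.empty).getD r []
        = hand.filter (fun c => pvRank c == r) := by
    intro r
    rw [hpair hand PySem.Dict.empty,
      PySem.Dict.getD_foldl_modify_append (hand.map (fun c => (pvRank c, c))) PySem.Dict.empty r]
    rw [PySem.Dict.getD_empty]
    rw [List.filter_map, List.map_map]
    simp [Function.comp_def]
  rw [PySem.Dict.items_eq_map_keys _ hnd [], hkeys]
  apply List.map_congr_left
  intro r _
  rw [hget r]

lemma pv_A_eq (hand : List (List (String × String))) (env_hand : List Int) (player_name : String) :
    check_and_remove_sets hand env_hand player_name
      = (hand.filter (fun c =>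
            !(decide (pvRank c ∈ pvDone hand (PySem.Set.ofList (hand.map pvRank))))),
         pvDropF (fun x => if x ∈ pvDone hand (PySem.Set.ofList (hand.map pvRank)) then 4 else 0)
           env_hand,
         (pvDone hand (PySem.Set.ofList (hand.map pvRank))).map pvToSuit) := by
  unfold check_and_remove_sets
  rw [pv_groupA hand]
  rw [pv_A_main hand (PySem.Set.ofList (hand.map pvRank)) (PySem.Set.nodup_ofList _)
    hand env_hand [] (fun r _ => rfl)]
  rw [List.nil_append]

lemma pv_count_eq (hand : List (List (String × String))) (r : Int) :
    (hand.map pvRank).count r = (hand.filter (fun c => pvRank c == r)).length := by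
  rw [← List.countP_eq_length_filter]
  simp only [List.count, List.countP_map]
  apply List.countP_congr
  intro c _
  by_cases h : pvRank c = r <;> simp [Function.comp_def, h]

lemma pv_envB (l : List Int) : ∀ (d : PySem.Dict Int Int) (acc : List Int),
    (l.foldl
      (fun st x => if 0 < st.1.getD x 0 then (st.1.modify x 0 (fun v => v - 1), st.2)
                   else (st.1, st.2 ++ [x]))
      (d, acc)).2
    = acc ++ pvDropF (fun x => d.getD x 0) l := by
  induction l with
  | nil => intro d acc; simp [pvDropF]
  | cons x t ih =>
    intro d acc
    by_cases hx : 0 < d.getD x 0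
    · simp only [List.foldl_cons, if_pos hx]
      rw [ih (d.modify x 0 (fun v => v - 1)) acc]
      simp only [pvDropF, if_pos hx]
      congr 2
      funext y
      rw [PySem.Dict.getD_modify]
    · simp only [List.foldl_cons, if_neg hx]
      rw [ih d (acc ++ [x])]
      simp [pvDropF, hx]
  
lemma pv_cap (l : List Int) : ∀ (d : PySem.Dict Int Int) (x : Int),
    (l.foldl (fun d r => d.insert r (4 : Int)) d).getD x 0
      = if x ∈ l then 4 else d.getD x 0 := by
  induction l with
  | nil => intro d x; simp
  | cons r t ih =>
    intro d x
    simp only [List.foldl_cons]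
    rw [ih (d.insert r 4) x, PySem.Dict.getD_insert]
    by_cases hxt : x ∈ t
    · simp [hxt]
    · by_cases hxr : x = r <;> simp [hxt, hxr]

lemma pv_B_eq (hand : List (List (String × String))) (env_hand : List Int) (player_name : String) :
    check_and_remove_sets_alt hand env_hand player_name
      = (hand.filter (fun c =>
            !(decide (pvRank c ∈ pvDone hand (PySem.Set.ofList (hand.map pvRank))))),
         pvDropF (fun x => if x ∈ pvDone hand (PySem.Set.ofList (hand.map pvRank)) then 4 else 0)
           env_hand,
         (pvDone hand (PySem.Set.ofList (hand.map pvRank))).map pvToSuit) := by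
  have hcomp : pvCompleted hand = pvDone hand (PySem.Set.ofList (hand.map pvRank)) := by
    unfold pvCompleted
    rw [PySem.Dict.foldl_insert_getD_add_one_eq_counter, PySem.Dict.items_counter]
    rw [List.filter_map, List.map_map]
    have hid : ((fun p => p.1) ∘ fun k => (k, ((hand.map pvRank).count k : Int)))
        = fun (k : Int) => k := by funext k; rfl
    rw [hid, List.map_id']
    unfold pvDone
    apply List.filter_congr
    intro r _
    show (((hand.map pvRank).count r : Int) == (4 : Int))
        = ((hand.filter (fun c => pvRank c == r)).length == 4)
    rw [pv_count_eq hand r]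
    by_cases h : (hand.filter (fun c => pvRank c == r)).length = 4
    · simp [h]
    · have : ¬ (((hand.filter (fun c => pvRank c == r)).length : Int) = (4 : Int)) := by
        exact_mod_cast h
      simp [h, this]
  unfold check_and_remove_sets_alt
  rw [hcomp]
  have h1 : ((hand.zip (hand.map pvRank)).filter
        (fun p => !((pvDone hand (PySem.Set.ofList (hand.map pvRank))).contains p.2))).map
          (fun p => p.1)
      = hand.filter
          (fun c => !(decide (pvRank c ∈ pvDone hand (PySem.Set.ofList (hand.map pvRank))))) := by
    have hz : ∀ l : List (List (String × String)),
        l.zip (l.map pvRank) = l.map (fun c => (c, pvRank c)) := by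
      intro l
      induction l with
      | nil => rfl
      | cons c t ih => simp [ih]
    rw [hz, List.filter_map, List.map_map]
    have hid : ((fun (p : (List (String × String)) × Int) => p.1) ∘ fun c => (c, pvRank c))
        = fun (c : List (String × String)) => c := by
      funext c; rfl
    rw [hid, List.map_id']
    apply List.filter_congr
    intro c _
    by_cases hm : pvRank c ∈ pvDone hand (PySem.Set.ofList (hand.map pvRank)) <;>
      simp [Function.comp_def, hm]
  have hfun : (fun x => ((pvDone hand (PySem.Set.ofList (hand.map pvRank))).foldl
        (fun d r => d.insert r (4 : Int)) PySem.Dict.empty).getD x 0)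
      = (fun x : Int =>
          if x ∈ pvDone hand (PySem.Set.ofList (hand.map pvRank)) then (4 : Int) else 0) := by
    funext x
    rw [pv_cap _ PySem.Dict.empty x, PySem.Dict.getD_empty]
  rw [pv_envB env_hand _ [], List.nil_append, hfun, h1]

-- ===== VERDICT (by name: the statement is the Claim_ definition above) =====
theorem check_and_remove_sets_spec : Claim_equal_check_and_remove_sets := by
  intro hand env_hand player_name _ _
  unfold Spec_check_and_remove_sets
  rw [pv_A_eq, pv_B_eq]
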